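-- pv_equiv track=rewrite | github.com/maxedout2/CS-313-Elements-of-Software-Design | Boxes.py | largest_nesting_subsets
-- ===== SOURCE A (Python) =====
-- def largest_nesting_subsets(all_box_subsets):
--     # init counter to track if subset does not fit inside next subset
--     counter = 0
--     # tracks real nested boxes
--     nested_boxes = []
--
--     for subset in all_box_subsets:
--         # use enumerate to track both index and value of each subset
--         for index, val in enumerate(subset):
--             # adds one to counter if subset does not fit
--             if index + 1 != len(subset) and not does_fit(val, subset[index + 1]):
--                 counter += 1
--         # append subset to nested list only if does fit returns true
--         if counter == 0:
--             nested_boxes.append(subset)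
--         # reset the counter for each subsequent subset
--         counter = 0
--
--     # parse through nested_boxes to find max length
--     max_length = 0
--     for subset in nested_boxes:
--         if len(subset) >= max_length:
--             max_length = len(subset)
--
--     # iterate through and append only the largest subsets to
--     # largest_subset_list
--     largest_subset_list = []
--     for subset in nested_boxes:
--         if len(subset) == max_length:
--             largest_subset_list.append(subset)
--
--     return largest_subset_list
--
-- def does_fit(box1, box2):
--     return box1[0] < box2[0] and box1[1] < box2[1] and box1[2] < box2[2]
-- ===== SOURCE B (Python) =====
-- def does_fit(box1, box2):
--     return box1[0] < box2[0] and box1[1] < box2[1] and box1[2] < box2[2]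
--
-- def largest_nesting_subsets(all_box_subsets):
--     # single pass: running best length (seeded at -1) and running list of best subsets
--     best_len = -1
--     result = []
--     for subset in all_box_subsets:
--         if all(does_fit(a, b) for a, b in zip(subset, subset[1:])):
--             n = len(subset)
--             if n > best_len:
--                 best_len = n
--                 result = [subset]
--             elif n == best_len:
--                 result.append(subset)
--     return result
-- ===== Notes on version B (the rewrite author's own statement) =====
-- stated objective: simpler
-- what changed: A makes three passes (filter valid subsets via a misfit counter over enumerate, then a max-length pass, then a collect pass); B is one fused pass keeping a running best length (seeded at -1) and the running list of longest valid subsets, testing validity with all() over consecutive pairs.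
import Mathlib
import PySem

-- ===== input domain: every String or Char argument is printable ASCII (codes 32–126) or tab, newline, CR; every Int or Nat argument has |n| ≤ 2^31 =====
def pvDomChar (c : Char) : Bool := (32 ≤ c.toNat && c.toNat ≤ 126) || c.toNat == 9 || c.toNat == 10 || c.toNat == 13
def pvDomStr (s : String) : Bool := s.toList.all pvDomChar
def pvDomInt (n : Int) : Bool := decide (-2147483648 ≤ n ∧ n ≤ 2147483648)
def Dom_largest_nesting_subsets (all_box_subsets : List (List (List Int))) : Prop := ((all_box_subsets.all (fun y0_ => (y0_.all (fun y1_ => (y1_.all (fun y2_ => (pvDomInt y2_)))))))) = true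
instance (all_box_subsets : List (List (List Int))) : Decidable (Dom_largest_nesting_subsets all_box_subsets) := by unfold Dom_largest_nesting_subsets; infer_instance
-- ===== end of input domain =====

-- B fuses A's three passes (filter, max-length, collect) into one running-best scan; objective: simpler.


-- ===== PORT A =====
-- does_fit; 0-based non-negative indexing is exact via getD under Pre_ (every index Python
-- actually evaluates is in range there; && short-circuits like Python's `and`)
def does_fit (box1 box2 : List Int) : Bool :=
  (box1.getD 0 0 < box2.getD 0 0) && (box1.getD 1 0 < box2.getD 1 0) && (box1.getD 2 0 < box2.getD 2 0)

def largest_nesting_subsets (all_box_subsets : List (List (List Int))) : List (List (List Int)) :=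
  let nested_boxes := all_box_subsets.foldl (fun nested_boxes subset =>
      let counter : Int := (PySem.List.enumerate subset).foldl (fun counter iv =>
          if iv.1 + 1 ≠ (subset.length : Int) ∧ ¬ does_fit iv.2 (PySem.List.pyGetD subset (iv.1 + 1) []) = true
          then counter + 1 else counter) 0
      if counter = 0 then nested_boxes ++ [subset] else nested_boxes) []
  let max_length : Int := nested_boxes.foldl (fun max_length subset =>
      if (subset.length : Int) ≥ max_length then (subset.length : Int) else max_length) 0
  nested_boxes.foldl (fun acc subset =>
      if (subset.length : Int) = max_length then acc ++ [subset] else acc) []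

-- ===== PORT B =====
def largest_nesting_subsets_alt (all_box_subsets : List (List (List Int))) : List (List (List Int)) :=
  (all_box_subsets.foldl (fun st subset =>
      if (subset.zip (subset.drop 1)).all (fun ab => does_fit ab.1 ab.2) then
        let n : Int := subset.length
        if n > st.1 then (n, [subset])
        else if n = st.1 then (st.1, st.2 ++ [subset])
        else st
      else st)
    ((-1 : Int), ([] : List (List (List Int))))).2

-- ===== PRECONDITION & SPEC =====
-- fitsSafely says does_fit(b1,b2) runs without IndexError: every index Python's
-- short-circuiting `and` actually evaluates is in range.
def fitsSafely (b1 b2 : List Int) : Prop :=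
  1 ≤ b1.length ∧ 1 ≤ b2.length ∧
  (b1.getD 0 0 < b2.getD 0 0 →
    2 ≤ b1.length ∧ 2 ≤ b2.length ∧
    (b1.getD 1 0 < b2.getD 1 0 → 3 ≤ b1.length ∧ 3 ≤ b2.length))

-- Pre_: exactly the inputs on which Python A returns normally (no IndexError from does_fit
-- on some consecutive pair of boxes).
def Pre_largest_nesting_subsets (all_box_subsets : List (List (List Int))) : Prop :=
  ∀ s ∈ all_box_subsets, ∀ p ∈ s.zip (s.drop 1), fitsSafely p.1 p.2
instance (all_box_subsets : List (List (List Int))) : Decidable (Pre_largest_nesting_subsets all_box_subsets) := by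
  unfold Pre_largest_nesting_subsets fitsSafely; infer_instance

def pvWitness_largest_nesting_subsets : List (List (List Int)) :=
  [[[1, 2, 3], [4, 5, 6]], [[9, 9, 9], [1, 1, 1]], []]

def Spec_largest_nesting_subsets (all_box_subsets : List (List (List Int))) (out : List (List (List Int))) : Prop := out = largest_nesting_subsets_alt all_box_subsets
instance (all_box_subsets : List (List (List Int))) (out : List (List (List Int))) : Decidable (Spec_largest_nesting_subsets all_box_subsets out) := by unfold Spec_largest_nesting_subsets; infer_instance

-- ===== CLAIM (what is proved, stated in full; the proofs are below) =====
def Claim_equal_largest_nesting_subsets : Prop := ∀ (all_box_subsets : List (List (List Int))), Dom_largest_nesting_subsets all_box_subsets → Pre_largest_nesting_subsets all_box_subsets → Spec_largest_nesting_subsets all_box_subsets (largest_nesting_subsets all_box_subsets)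

-- ===== LEMMAS AND PROOFS =====

-- B's validity test, named for the proofs
def validB (s : List (List Int)) : Bool :=
  (s.zip (s.drop 1)).all (fun ab => does_fit ab.1 ab.2)

-- A's misfit counter is zero exactly when B's pairwise test succeeds
lemma counter_zero_iff_validB (s : List (List Int)) :
    ((PySem.List.enumerate s).foldl (fun counter iv =>
        if iv.1 + 1 ≠ (s.length : Int) ∧ ¬ does_fit iv.2 (PySem.List.pyGetD s (iv.1 + 1) []) = true
        then counter + 1 else counter) (0 : Int)) = 0 ↔ validB s = true := by
  rw [PySem.List.foldl_ite_add_one]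
  simp only [zero_add, Int.natCast_eq_zero, List.countP_eq_zero, validB, List.all_eq_true]
  constructor
  · intro h ab hab
    rw [List.mem_iff_getElem] at hab
    obtain ⟨i, hi, hab⟩ := hab
    simp only [List.length_zip, List.length_drop, lt_min_iff] at hi
    have hs : i < s.length := hi.1
    have hi1 : i + 1 < s.length := by omega
    have hmem : ((i : Int), s[i]) ∈ PySem.List.enumerate s := by
      rw [PySem.List.mem_enumerate_iff]; exact ⟨i, hs, by simp⟩
    have := h _ hmem
    simp only [decide_eq_true_eq, not_and, not_not] at this
    have hne : (i : Int) + 1 ≠ (s.length : Int) := by omega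
    have hfit := this hne
    have : PySem.List.pyGetD s ((i : Int) + 1) [] = s[i + 1] := by
      have : ((i : Int) + 1) = ((i + 1 : Nat) : Int) := by push_cast; ring
      rw [this, PySem.List.pyGetD_natCast]
      simp [List.getD, hi1]
    rw [this] at hfit
    have hab' : ab = (s[i], s[i + 1]) := by
      rw [← hab]; simp [List.getElem_zip]
    rw [hab']; exact hfit
  · intro h iv hiv
    rw [PySem.List.mem_enumerate_iff] at hiv
    obtain ⟨k, hk, hiv⟩ := hiv
    subst hiv
    simp only [decide_eq_true_eq, not_and, not_not, zero_add]
    intro hne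
    have hk1 : k + 1 < s.length := by omega
    have hmem : (s[k], s[k + 1]) ∈ s.zip (s.drop 1) := by
      rw [List.mem_iff_getElem]
      refine ⟨k, by simp [List.length_zip]; omega, ?_⟩
      simp [List.getElem_zip]
    have := h _ hmem
    have hget : PySem.List.pyGetD s ((k : Int) + 1) [] = s[k + 1] := by
      have : ((k : Int) + 1) = ((k + 1 : Nat) : Int) := by push_cast; ring
      rw [this, PySem.List.pyGetD_natCast]
      simp [List.getD, hk1]
    rw [hget]; exact this

-- B's step restricted to valid subsets
def stepV (st : Int × List (List (List Int))) (subset : List (List Int)) :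
    Int × List (List (List Int)) :=
  if (subset.length : Int) > st.1 then ((subset.length : Int), [subset])
  else if (subset.length : Int) = st.1 then (st.1, st.2 ++ [subset])
  else st

-- running max of lengths
def maxAux (v : List (List (List Int))) (b : Int) : Int :=
  v.foldl (fun m s => max m ((s.length : Int))) b

lemma maxAux_nil (b : Int) : maxAux [] b = b := rfl
lemma maxAux_cons (s : List (List Int)) (t : List (List (List Int))) (b : Int) :
    maxAux (s :: t) b = maxAux t (max b (s.length : Int)) := rfl

lemma le_maxAux (v : List (List (List Int))) (b : Int) : b ≤ maxAux v b := by
  induction v generalizing b with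
  | nil => simp [maxAux_nil]
  | cons s t ih =>
    rw [maxAux_cons]
    exact le_trans (le_max_left _ _) (ih _)

-- the running-best invariant for B's fused pass over the valid subsets
lemma foldl_stepV (v : List (List (List Int))) (best : Int) (res : List (List (List Int))) :
    (v.foldl stepV (best, res)).2 =
      (if best = maxAux v best then res else []) ++
        v.filter (fun s => (s.length : Int) = maxAux v best) := by
  induction v generalizing best res with
  | nil => simp [maxAux_nil]
  | cons s t ih =>
    have hM : maxAux (s :: t) best = maxAux t (max best (s.length : Int)) := maxAux_cons s t best
    rcases lt_trichotomy (best : Int) ((s.length : Int)) with hlt | heq | hgt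
    · have hstep : stepV (best, res) s = ((s.length : Int), [s]) := by
        unfold stepV; rw [if_pos (by omega)]
      rw [List.foldl_cons, hstep, ih]
      have hmax : max best (s.length : Int) = (s.length : Int) := by omega
      rw [hM, hmax]
      have hbestne : ¬ best = maxAux t (s.length : Int) := by
        have := le_maxAux t ((s.length : Int)); omega
      rw [if_neg hbestne, List.filter_cons]
      by_cases hs : (s.length : Int) = maxAux t (s.length : Int)
      · rw [if_pos hs, if_pos (decide_eq_true hs)]; rfl
      · rw [if_neg hs, if_neg (by simpa using hs)]
    · have hstep : stepV (best, res) s = (best, res ++ [s]) := by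
        unfold stepV; rw [if_neg (by omega), if_pos (by omega)]
      rw [List.foldl_cons, hstep, ih]
      have hmax : max best (s.length : Int) = best := by omega
      rw [hM, hmax, List.filter_cons]
      by_cases hb : best = maxAux t best
      · rw [if_pos hb, if_pos (heq.symm ▸ hb), decide_eq_true (heq ▸ hb)]
        simp
      · rw [if_neg hb, if_neg (heq.symm ▸ hb)]
        have : ¬ ((s.length : Int) = maxAux t best) := fun h => hb (heq ▸ h)
        simp [this]
    · have hstep : stepV (best, res) s = (best, res) := by
        unfold stepV; rw [if_neg (by omega), if_neg (by omega)]
      rw [List.foldl_cons, hstep, ih]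
      have hmax : max best (s.length : Int) = best := by omega
      rw [hM, hmax, List.filter_cons]
      have : ¬ ((s.length : Int) = maxAux t best) := by
        have := le_maxAux t best; omega
      simp [this]

-- A's three passes, rewritten: filter, then max, then collect
lemma portA_eq (xs : List (List (List Int))) :
    largest_nesting_subsets xs =
      (xs.filter validB).filter
        (fun s => (s.length : Int) = maxAux (xs.filter validB) 0) := by
  simp only [largest_nesting_subsets]
  have h1 : xs.foldl (fun nested_boxes subset =>
      let counter : Int := (PySem.List.enumerate subset).foldl (fun counter iv =>
          if iv.1 + 1 ≠ (subset.length : Int) ∧ ¬ does_fit iv.2 (PySem.List.pyGetD subset (iv.1 + 1) []) = true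
          then counter + 1 else counter) 0
      if counter = 0 then nested_boxes ++ [subset] else nested_boxes) [] = xs.filter validB := by
    have := PySem.List.foldl_append_ite_eq_filter
      (l := xs) (acc := ([] : List (List (List Int))))
      (p := fun subset => ((PySem.List.enumerate subset).foldl (fun counter iv =>
          if iv.1 + 1 ≠ (subset.length : Int) ∧ ¬ does_fit iv.2 (PySem.List.pyGetD subset (iv.1 + 1) []) = true
          then counter + 1 else counter) (0 : Int)) = 0)
    simp only [List.nil_append] at this
    rw [this]
    apply List.filter_congr
    intro s _
    simp only [counter_zero_iff_validB]
    by_cases h : validB s = true <;> simp [h]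
  rw [h1]
  have h2 : (xs.filter validB).foldl (fun max_length subset =>
      if (subset.length : Int) ≥ max_length then (subset.length : Int) else max_length) 0
      = maxAux (xs.filter validB) 0 := by
    unfold maxAux
    apply PySem.List.foldl_congr_mem
    intro acc s _
    rcases le_or_gt acc ((s.length : Int)) with h | h
    · simp [h]
    · rw [if_neg (by omega), max_eq_left (by omega)]
  rw [h2]
  rw [PySem.List.foldl_append_ite_eq_filter]
  simp

-- B's fused pass, rewritten the same way
lemma portB_eq (xs : List (List (List Int))) :
    largest_nesting_subsets_alt xs =
      (xs.filter validB).filter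
        (fun s => (s.length : Int) = maxAux (xs.filter validB) (-1)) := by
  unfold largest_nesting_subsets_alt
  have h0 : (xs.foldl (fun st subset =>
      if (subset.zip (subset.drop 1)).all (fun ab => does_fit ab.1 ab.2) then
        let n : Int := subset.length
        if n > st.1 then (n, [subset])
        else if n = st.1 then (st.1, st.2 ++ [subset])
        else st
      else st) ((-1 : Int), ([] : List (List (List Int))))) =
      xs.foldl (fun st subset =>
      if validB subset then stepV st subset else st)
        ((-1 : Int), ([] : List (List (List Int)))) := rfl
  rw [h0, PySem.List.foldl_if_eq_foldl_filter (p := validB) (f := stepV),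
    foldl_stepV, ite_self, List.nil_append]

-- the two seeds agree: on a nonempty valid list both running maxima are the max length;
-- on the empty list both filters are empty
lemma maxAux_seed (v : List (List (List Int))) (hv : v ≠ []) :
    maxAux v (-1) = maxAux v 0 := by
  cases v with
  | nil => exact absurd rfl hv
  | cons s t =>
    rw [maxAux_cons, maxAux_cons]
    have : max (-1 : Int) ((s.length : Int)) = max 0 ((s.length : Int)) := by omega
    rw [this]

lemma ports_agree (xs : List (List (List Int))) :
    largest_nesting_subsets xs = largest_nesting_subsets_alt xs := by
  rw [portA_eq, portB_eq]
  cases hv : xs.filter validB with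
  | nil => simp
  | cons s t => rw [← hv, maxAux_seed _ (by rw [hv]; simp)]

-- ===== VERDICT (by name: the statement is the Claim_ definition above) =====
theorem largest_nesting_subsets_spec : Claim_equal_largest_nesting_subsets := by
  intro xs _ _
  unfold Spec_largest_nesting_subsets
  exact ports_agree xs
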